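-- pv_equiv track=rewrite | github.com/getachew67/CSE-160 | Midterm 1/midterm_21au.py | squash_in_half
-- ===== SOURCE A (Python) =====
-- def squash_in_half(grid):
--     '''
--     Takes in a grid that is a list of lists of integers representating a
--     rectangular grid. Returns a new 'squashed' version of the given grid,
--     where every two consecutive rows in the original grid have been
--     combined into a single row in the output grid. Assume grid and its sublists
--     are all non-empty.
--
--     Arguments:
--         grid: a list of lists representating a rectangular grid.
--
--     Returns: a list of lists representing a squashed grid
--     '''
--     new_list = []
--     if len(grid) % 2 == 0:
--         toSubtract = 0
--     else:
--         toSubtract = 1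
--     for i in range(0, len(grid) - toSubtract, 2):
--         toAppend = []
--         for j in range(0, len(grid[i])):
--             toAppend.append(grid[i][j] + grid[i + 1][j])
--         new_list.append(toAppend)
--     if toSubtract == 1:
--         new_list.append(grid[len(grid) - 1])
--     return new_list
-- ===== SOURCE B (Python) =====
-- def squash_in_half(grid):
--     if len(grid) < 2:
--         return list(grid)
--     first = [a + b for a, b in zip(grid[0], grid[1])]
--     return [first] + squash_in_half(grid[2:])
-- ===== Notes on version B (the rewrite author's own statement) =====
-- stated objective: simpler
-- what changed: Replaced the index-arithmetic loop over range(0, len-toSubtract, 2) with nested grid[i][j] indexing by a direct structural recursion that consumes two rows at a time and zips each pair, with the leftover row falling out of the base case.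
import Mathlib
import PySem

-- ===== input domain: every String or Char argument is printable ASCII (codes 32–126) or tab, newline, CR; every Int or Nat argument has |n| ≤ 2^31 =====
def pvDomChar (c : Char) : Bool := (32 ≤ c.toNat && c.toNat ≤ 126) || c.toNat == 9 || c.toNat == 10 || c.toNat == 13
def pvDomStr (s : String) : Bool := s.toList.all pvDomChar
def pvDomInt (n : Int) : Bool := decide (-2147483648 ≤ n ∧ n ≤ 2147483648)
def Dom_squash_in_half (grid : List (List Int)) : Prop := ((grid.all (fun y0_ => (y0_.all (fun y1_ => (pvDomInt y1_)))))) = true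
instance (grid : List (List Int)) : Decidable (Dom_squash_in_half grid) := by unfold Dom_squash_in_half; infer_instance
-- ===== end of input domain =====

-- B replaces A's index-arithmetic stride-2 loop by a structural recursion that zips two rows at
-- a time (objective: simpler); equivalence is about the return value (A aliases the odd trailing
-- row, B copies the sub-list structure only at the top level — values are equal).

-- ===== PORT A =====
def squash_in_half (grid : List (List Int)) : List (List Int) :=
  let toSubtract : Int := if PySem.Int.mod (grid.length : Int) 2 = 0 then 0 else 1
  let new_list := (PySem.List.pyRange 0 ((grid.length : Int) - toSubtract) 2).foldl
    (fun acc i =>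
      let toAppend :=
        (PySem.List.pyRange 0 ((PySem.List.pyGetD grid i []).length : Int) 1).foldl
          (fun row j =>
            row ++ [PySem.List.pyGetD (PySem.List.pyGetD grid i []) j 0
                  + PySem.List.pyGetD (PySem.List.pyGetD grid (i + 1) []) j 0]) []
      acc ++ [toAppend]) []
  if toSubtract = 1 then new_list ++ [PySem.List.pyGetD grid ((grid.length : Int) - 1) []]
  else new_list

-- ===== PORT B =====
def squash_in_half_alt (grid : List (List Int)) : List (List Int) :=
  match grid with
  | [] => []                -- len(grid) < 2: return list(grid)
  | [x] => [x]
  | a :: b :: rest =>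
      let first := (a.zip b).map (fun q => q.1 + q.2)
      [first] ++ squash_in_half_alt rest

-- ===== PRECONDITION & SPEC =====
-- Pre_ excludes exactly the ragged grids on which A raises IndexError at grid[i+1][j]
-- (an even-indexed row longer than its odd partner row); A returns on everything else.
def Pre_squash_in_half (grid : List (List Int)) : Prop :=
  ∀ k, k < grid.length / 2 →
    (grid.getD (2 * k) []).length ≤ (grid.getD (2 * k + 1) []).length
instance (grid : List (List Int)) : Decidable (Pre_squash_in_half grid) := by
  unfold Pre_squash_in_half; infer_instance
def pvWitness_squash_in_half : List (List Int) := [[1, 2], [3, 4], [5, 6]]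

def Spec_squash_in_half (grid : List (List Int)) (out : List (List Int)) : Prop := out = squash_in_half_alt grid
instance (grid : List (List Int)) (out : List (List Int)) : Decidable (Spec_squash_in_half grid out) := by unfold Spec_squash_in_half; infer_instance

-- ===== CLAIM (what is proved, stated in full; the proofs are below) =====
def Claim_equal_squash_in_half : Prop := ∀ (grid : List (List Int)), Dom_squash_in_half grid → Pre_squash_in_half grid → Spec_squash_in_half grid (squash_in_half grid)

-- ===== LEMMAS AND PROOFS =====

-- the common shape: pair-sum rows by index, then the odd leftover row
def pvModel (grid : List (List Int)) : List (List Int) :=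
  (List.range (grid.length / 2)).map
    (fun k => ((grid.getD (2 * k) []).zip (grid.getD (2 * k + 1) [])).map (fun q => q.1 + q.2))
  ++ (if grid.length % 2 = 1 then [grid.getD (grid.length - 1) []] else [])

-- the indexed row sum collapses to zip when the first row is no longer than the second
lemma range_getD_add_eq_zip (r1 : List Int) : ∀ (r2 : List Int), r1.length ≤ r2.length →
    (List.range r1.length).map (fun j => r1.getD j 0 + r2.getD j 0)
      = (r1.zip r2).map (fun q => q.1 + q.2) := by
  induction r1 with
  | nil => intro r2 _; simp
  | cons x xs ih =>
      intro r2 h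
      cases r2 with
      | nil => simp at h
      | cons y ys =>
          simp only [List.length_cons, List.range_succ_eq_map, List.map_cons, List.map_map,
            List.getD_cons_zero, List.zip_cons_cons]
          refine congrArg _ ?_
          have := ih ys (by simpa using h)
          simpa [Function.comp] using this

lemma model_eq_alt (grid : List (List Int)) : pvModel grid = squash_in_half_alt grid := by
  induction grid using squash_in_half_alt.induct with
  | case1 => simp [pvModel, squash_in_half_alt]
  | case2 x => simp [pvModel, squash_in_half_alt]
  | case3 a b rest ih =>
      simp only [squash_in_half_alt, ← ih, pvModel]
      have hlen : (a :: b :: rest).length = rest.length + 2 := by simp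
      rw [hlen]
      have hdiv : (rest.length + 2) / 2 = rest.length / 2 + 1 := by omega
      have hmod : (rest.length + 2) % 2 = rest.length % 2 := by omega
      rw [hdiv, hmod, List.range_succ_eq_map, List.map_cons, List.cons_append,
        List.singleton_append]
      congr 1
      congr 1
      · rw [List.map_map]
        refine List.map_congr_left (fun k _ => ?_)
        have h1 : 2 * (k + 1) = 2 * k + 1 + 1 := by ring
        simp [Function.comp, h1]
      · by_cases h1 : rest.length % 2 = 1
        · obtain ⟨m, hm'⟩ : ∃ m, rest.length = m + 1 := ⟨rest.length - 1, by omega⟩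
          simp [hm']
        · simp [h1]

-- A's outer foldl, with Pre_, computes pvModel
lemma a_eq_model (grid : List (List Int)) (hp : Pre_squash_in_half grid) :
    squash_in_half grid = pvModel grid := by
  simp only [squash_in_half, pvModel]
  have hrow : ∀ m : Nat, m ≤ grid.length / 2 →
      (PySem.List.pyRange 0 (2 * (m : Int)) 2).foldl
        (fun acc i =>
          acc ++ [(PySem.List.pyRange 0 ((PySem.List.pyGetD grid i []).length : Int) 1).foldl
            (fun row j =>
              row ++ [PySem.List.pyGetD (PySem.List.pyGetD grid i []) j 0
                    + PySem.List.pyGetD (PySem.List.pyGetD grid (i + 1) []) j 0]) []]) []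
      = (List.range m).map
          (fun k => ((grid.getD (2 * k) []).zip (grid.getD (2 * k + 1) [])).map
            (fun q => q.1 + q.2)) := by
    intro m hm
    rw [PySem.List.pyRange_of_pos 0 (2 * (m : Int)) (by norm_num)]
    rw [List.foldl_map, PySem.List.foldl_append_singleton_eq_map, List.nil_append]
    have hcnt : (if (0 : Int) < 2 * (m : Int) then ((2 * (m : Int) - 0 + 2 - 1) / 2).toNat else 0) = m := by
      rcases Nat.eq_zero_or_pos m with h0 | h0
      · simp [h0]
      · have hlt : (0 : Int) < 2 * (m : Int) := by positivity
        rw [if_pos hlt]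
        omega
    rw [hcnt]
    refine List.map_congr_left (fun k hk => ?_)
    have hk' : k < m := List.mem_range.mp hk
    have hi0 : (0 : Int) + 2 * (k : Int) = ((2 * k : Nat) : Int) := by push_cast; ring
    have hi1 : (0 : Int) + 2 * (k : Int) + 1 = ((2 * k + 1 : Nat) : Int) := by push_cast; ring
    rw [hi0]
    rw [show ((2 * k : Nat) : Int) + 1 = ((2 * k + 1 : Nat) : Int) by push_cast; ring]
    rw [PySem.List.pyGetD_natCast, PySem.List.pyGetD_natCast]
    -- inner loop: indexed sums over range(len(grid[i]))
    rw [PySem.List.pyRange_one 0 ((grid.getD (2 * k) []).length : Int)]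
    rw [List.foldl_map, PySem.List.foldl_append_singleton_eq_map, List.nil_append]
    have hlen : (((grid.getD (2 * k) []).length : Int) - 0).toNat = (grid.getD (2 * k) []).length := by
      omega
    rw [hlen]
    have hmap : ∀ j ∈ List.range (grid.getD (2 * k) []).length,
        PySem.List.pyGetD (grid.getD (2 * k) []) ((0 : Int) + (j : Int)) 0
          + PySem.List.pyGetD (grid.getD (2 * k + 1) []) ((0 : Int) + (j : Int)) 0
        = (grid.getD (2 * k) []).getD j 0 + (grid.getD (2 * k + 1) []).getD j 0 := by
      intro j _
      rw [show (0 : Int) + (j : Int) = ((j : Nat) : Int) by ring]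
      rw [PySem.List.pyGetD_natCast, PySem.List.pyGetD_natCast]
    rw [List.map_congr_left hmap]
    exact range_getD_add_eq_zip _ _ (hp k (by omega))
  have hmod2 : PySem.Int.mod (grid.length : Int) 2 = ((grid.length % 2 : Nat) : Int) := by
    rw [PySem.Int.mod_eq_emod_of_pos (by norm_num : (0:Int) < 2)]; omega
  rcases Nat.even_or_odd grid.length with he | ho
  · have h0 : grid.length % 2 = 0 := Nat.even_iff.mp he
    have hc : PySem.Int.mod (grid.length : Int) 2 = 0 := by rw [hmod2, h0]; simp
    rw [if_pos hc, if_neg (by norm_num : ¬ (0 : Int) = 1)]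
    rw [show (grid.length : Int) - 0 = 2 * ((grid.length / 2 : Nat) : Int) by omega]
    rw [hrow (grid.length / 2) (le_refl _)]
    simp [h0]
  · have h1 : grid.length % 2 = 1 := Nat.odd_iff.mp ho
    have hc : ¬ PySem.Int.mod (grid.length : Int) 2 = 0 := by rw [hmod2, h1]; simp
    rw [if_neg hc, if_pos rfl]
    rw [show (grid.length : Int) - 1 = 2 * ((grid.length / 2 : Nat) : Int) by omega]
    rw [hrow (grid.length / 2) (le_refl _)]
    rw [show 2 * ((grid.length / 2 : Nat) : Int) = ((grid.length - 1 : Nat) : Int) by omega]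
    rw [PySem.List.pyGetD_natCast]
    simp [h1]

-- ===== VERDICT (by name: the statement is the Claim_ definition above) =====
theorem squash_in_half_spec : Claim_equal_squash_in_half := by
  intro grid _ hp
  unfold Spec_squash_in_half
  rw [a_eq_model grid hp, model_eq_alt]
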